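-- pv_equiv track=rewrite | github.com/DBcreator/Algorithms | Greedy algorithms/various terms.py | various
-- ===== SOURCE A (Python) =====
-- def various(n):
--     numbers = []
--     for i in range(1,n):
--         n -= i
--         numbers.append(i)
--         if n >= i+1:
--             continue
--         else:
--             numbers.pop()
--             numbers.append(n+i)
--             break
--     return numbers
-- ===== SOURCE B (Python) =====
-- import math
--
-- def various(n):
--     if n < 2:
--         return []
--     k = (math.isqrt(8 * n + 1) - 1) // 2   # largest k with k*(k+1)//2 <= n
--     return list(range(1, k)) + [n - (k - 1) * k // 2]
-- ===== Notes on version B (the rewrite author's own statement) =====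
-- stated objective: simpler
-- what changed: Replaced the subtract/append/pop/break loop with a closed-form count k = (isqrt(8n+1)-1)//2 followed by a one-shot list build, absorbing the remainder into the final element.
import Mathlib
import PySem

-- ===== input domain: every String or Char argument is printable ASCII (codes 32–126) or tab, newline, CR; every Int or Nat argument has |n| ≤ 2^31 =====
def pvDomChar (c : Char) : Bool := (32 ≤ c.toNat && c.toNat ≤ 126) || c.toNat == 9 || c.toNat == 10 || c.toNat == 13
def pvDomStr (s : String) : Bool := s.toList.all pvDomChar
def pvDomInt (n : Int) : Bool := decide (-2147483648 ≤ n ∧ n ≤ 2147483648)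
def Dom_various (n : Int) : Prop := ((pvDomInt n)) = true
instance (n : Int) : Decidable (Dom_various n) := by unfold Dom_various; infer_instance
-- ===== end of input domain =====

-- B replaces A's subtract/append/pop/break loop by the closed-form count k = (isqrt(8n+1)-1)//2
-- and a one-shot list build; equal on all inputs (objective: simpler).

-- ===== PORT A =====
-- the for-loop of A: state = (remaining n, numbers); break returns immediately
def variousLoop : List Int → Int → List Int → List Int
  | [], _, numbers => numbers
  | i :: rest, n, numbers =>
    let n' := n - i
    let numbers' := numbers ++ [i]
    if n' ≥ i + 1 then variousLoop rest n' numbers'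
    else numbers'.dropLast ++ [n' + i]          -- numbers.pop(); numbers.append(n+i); break

def various (n : Int) : List Int :=
  variousLoop (PySem.List.pyRange 1 n 1) n []

-- ===== PORT B =====
-- list(range(1, k)) + [n - (k - 1) * k // 2]
def varAltBuild (n k : Int) : List Int :=
  PySem.List.pyRange 1 k 1 ++ [n - PySem.Int.floordiv ((k - 1) * k) 2]

def various_alt (n : Int) : List Int :=
  if n < 2 then []
  else varAltBuild n (PySem.Int.floordiv ((Nat.sqrt (8 * n + 1).toNat : Int) - 1) 2)

-- ===== PRECONDITION & SPEC =====
def Spec_various (n : Int) (out : List Int) : Prop := out = various_alt n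
instance (n : Int) (out : List Int) : Decidable (Spec_various n out) := by
  unfold Spec_various; infer_instance

-- ===== CLAIM =====
def Claim_equal_various : Prop := ∀ (n : Int), Dom_various n → Spec_various n (various n)

-- ===== LEMMAS AND PROOFS =====

-- proof-side characterisation of A's loop at state (i, m)
def greedy (i m : Int) : List Int :=
  if h : 1 ≤ i ∧ i + 1 ≤ m - i then i :: greedy (i + 1) (m - i)
  else [m]
termination_by (m - 2 * i).toNat
decreasing_by omega

theorem variousLoop_eq_greedy (i m N : Int) (acc : List Int)
    (hi : 1 ≤ i) (hiN : i < N) (hm : m ≤ N) :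
    variousLoop (PySem.List.pyRange i N 1) m acc = acc ++ greedy i m := by
  fun_induction greedy i m generalizing N acc with
  | case1 i m h ih =>
    rw [PySem.List.pyRange_one_cons hiN]
    simp only [variousLoop]
    rw [if_pos (by omega)]
    rw [ih N (acc ++ [i]) (by omega) (by omega) (by omega)]
    simp
  | case2 i m h =>
    rw [PySem.List.pyRange_one_cons hiN]
    simp only [variousLoop]
    rw [if_neg (by omega)]
    simp

theorem greedy_closed (i m k c : Int)
    (hi : 1 ≤ i) (hik : i ≤ k)
    (hc : 2 * c = (k - 1) * k - (i - 1) * i)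
    (hlo : k * (k + 1) - (i - 1) * i ≤ 2 * m)
    (hhi : 2 * m < (k + 1) * (k + 2) - (i - 1) * i) :
    greedy i m = PySem.List.pyRange i k 1 ++ [m - c] := by
  fun_induction greedy i m generalizing k c with
  | case1 i m h ih =>
    have hik' : i < k := by
      by_contra hx
      have hk : k = i := by omega
      subst hk
      nlinarith
    rw [PySem.List.pyRange_one_cons hik']
    rw [ih k (c - i) (by omega) (by omega) (by nlinarith) (by nlinarith) (by nlinarith)]
    have : m - i - (c - i) = m - c := by ring
    rw [this]
    simp
  | case2 i m h =>
    have hk : k = i := by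
      by_contra hx
      have hik' : i + 1 ≤ k := by omega
      have hm2 : 2 * m ≤ 4 * i := by omega
      nlinarith
    subst hk
    have hc0 : c = 0 := by omega
    subst hc0
    rw [PySem.List.pyRange_one_eq_nil (by omega)]
    simp

theorem sqrt_k_bounds (n : Int) (hn : 2 ≤ n) :
    1 ≤ ((Nat.sqrt (8 * n + 1).toNat : Int) - 1) / 2 ∧
    (((Nat.sqrt (8 * n + 1).toNat : Int) - 1) / 2) * ((((Nat.sqrt (8 * n + 1).toNat : Int) - 1) / 2) + 1) ≤ 2 * n ∧
    2 * n < ((((Nat.sqrt (8 * n + 1).toNat : Int) - 1) / 2) + 1) * ((((Nat.sqrt (8 * n + 1).toNat : Int) - 1) / 2) + 2) := by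
  set M : Nat := (8 * n + 1).toNat with hM
  have hMi : (M : Int) = 8 * n + 1 := by omega
  set s : Nat := Nat.sqrt M with hs
  have h1 : s ^ 2 ≤ M := Nat.sqrt_le' M
  have h2 : M < (s + 1) ^ 2 := Nat.lt_succ_sqrt' M
  have hs4 : 4 ≤ s := by
    have h16 : 16 ≤ M := by omega
    by_contra hx
    have : s + 1 ≤ 4 := by omega
    nlinarith
  set k : Int := ((s : Int) - 1) / 2 with hk
  have hk1 : 2 * k ≤ (s : Int) - 1 ∧ (s : Int) - 1 ≤ 2 * k + 1 := by
    constructor <;> omega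
  have h1i : (s : Int) * (s : Int) ≤ 8 * n + 1 := by
    have h1' : ((s : Int)) ^ 2 ≤ (M : Int) := by exact_mod_cast h1
    nlinarith
  have h2i : 8 * n + 1 < ((s : Int) + 1) * ((s : Int) + 1) := by
    have h2' : ((M : Int)) < ((s : Int) + 1) ^ 2 := by exact_mod_cast h2
    nlinarith
  refine ⟨by omega, ?_, ?_⟩
  · nlinarith [hk1.1, hk1.2]
  · nlinarith [hk1.1, hk1.2]

-- ===== VERDICT =====
theorem various_spec : Claim_equal_various := by
  unfold Claim_equal_various
  intro n _
  unfold Spec_various various various_alt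
  by_cases hn : n < 2
  · rw [PySem.List.pyRange_one_eq_nil (by omega), if_pos hn]
    rfl
  · have hn2 : 2 ≤ n := by omega
    rw [if_neg (by omega)]
    have hs4 : (4 : Int) ≤ (Nat.sqrt (8 * n + 1).toNat : Int) := by
      have h16 : 16 ≤ (8 * n + 1).toNat := by omega
      have hle : 4 ≤ Nat.sqrt ((8 * n + 1).toNat) := by
        by_contra hx
        have h2 := Nat.lt_succ_sqrt' ((8 * n + 1).toNat)
        have : Nat.sqrt ((8 * n + 1).toNat) + 1 ≤ 4 := by omega
        nlinarith
      exact_mod_cast hle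
    rw [PySem.Int.floordiv_eq_ediv_of_pos (by omega)]
    unfold varAltBuild
    rw [PySem.Int.floordiv_eq_ediv_of_pos (by omega)]
    set k : Int := ((Nat.sqrt (8 * n + 1).toNat : Int) - 1) / 2 with hkdef
    obtain ⟨hk1, hlo, hhi⟩ := sqrt_k_bounds n hn2
    rw [← hkdef] at hk1 hlo hhi
    have heven : (2 : Int) ∣ (k - 1) * k := by
      rcases Int.even_or_odd k with he | ho
      · exact Dvd.dvd.mul_left he.two_dvd _
      · have : Even (k - 1) := by
          rcases ho with ⟨m, hm⟩; exact ⟨m, by omega⟩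
        exact Dvd.dvd.mul_right this.two_dvd _
    have hc : 2 * ((k - 1) * k / 2) = (k - 1) * k := by
      rw [Int.mul_ediv_cancel' heven]
    rw [variousLoop_eq_greedy 1 n n [] (by omega) (by omega) (by omega)]
    rw [greedy_closed 1 n k ((k - 1) * k / 2) (by omega) (by omega) (by omega)
      (by nlinarith) (by nlinarith)]
    simp
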